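-- pv_equiv track=rewrite | github.com/ATB-UQ/ATB_repository | atbr_updater/update.py | where_in
-- ===== SOURCE A (Python) =====
-- def where_in(name, value, big_range):
--     """Determines which bucket of big_range 'value' lies in."""
--     bottom = big_range[0]
--     top = big_range[1]
--     step = big_range[2]
--     i = 0
--     bot_range = bottom + i * step
--
--     while bot_range < top:
--         bot_range = bottom + i * step
--         top_range = bottom + (i + 1) * step
--         i += 1
--         if value >= bot_range and value < top_range:
--             tag = name +  " {0}-{1}".format(bot_range, top_range)
--             return tag
-- ===== SOURCE B (Python) =====
-- def where_in(name, value, big_range):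
--     """Determines which bucket of big_range 'value' lies in (direct index by floor division)."""
--     bottom = big_range[0]
--     top = big_range[1]
--     step = big_range[2]
--     if value < bottom or value >= top:
--         return None
--     lo = bottom + (value - bottom) // step * step
--     return name + " {0}-{1}".format(lo, lo + step)
-- ===== Notes on version B (the rewrite author's own statement) =====
-- stated objective: alternative
-- what changed: Replaces A's bucket-by-bucket while-loop scan with a direct floor-division computation of the bucket start; Pre_ excludes lists shorter than 3 (A raises IndexError) and bottom<top with step<=0 (A's loop never terminates).
-- intended difference: On inputs with bottom < top where value >= top yet lands in the one extra bucket A's stale loop condition still scans (bucket start < top + step), A returns a tag for a bucket lying at or beyond top, while B returns None; None is the intended value since value lies outside [bottom, top). — e.g. on where_in("x", 10, [0, 10, 3]): A returns some "x 9-12", B returns none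
import Mathlib
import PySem

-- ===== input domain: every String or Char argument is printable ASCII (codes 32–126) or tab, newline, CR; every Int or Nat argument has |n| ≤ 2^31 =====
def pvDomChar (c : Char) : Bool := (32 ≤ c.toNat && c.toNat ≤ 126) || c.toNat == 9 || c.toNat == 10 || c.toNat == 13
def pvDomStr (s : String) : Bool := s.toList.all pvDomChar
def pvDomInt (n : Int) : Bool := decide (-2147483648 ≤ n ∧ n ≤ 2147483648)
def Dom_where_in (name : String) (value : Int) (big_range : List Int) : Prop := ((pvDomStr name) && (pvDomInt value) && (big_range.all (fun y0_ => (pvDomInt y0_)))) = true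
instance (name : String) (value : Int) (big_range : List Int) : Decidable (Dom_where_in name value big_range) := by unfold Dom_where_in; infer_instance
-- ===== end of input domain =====

-- B replaces A's bucket-by-bucket while-loop scan by a direct floor-division computation of the bucket start.

-- ===== PORT A =====
-- Faithful transliteration of A's while loop; the fuel ((top-bottom).toNat + 2) strictly
-- exceeds the number of iterations whenever the Python loop terminates (step ≥ 1 under Pre_).
def whereInLoop (name : String) (value bottom top step : Int) (i botRange : Int) : Nat → Option String
  | 0 => none
  | fuel + 1 =>
    if botRange < top then
      let botRange' := bottom + i * step
      let topRange := bottom + (i + 1) * step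
      if value ≥ botRange' ∧ value < topRange then
        some (name ++ " " ++ PySem.Int.toStr botRange' ++ "-" ++ PySem.Int.toStr topRange)
      else whereInLoop name value bottom top step (i + 1) botRange' fuel
    else none

def where_in (name : String) (value : Int) (big_range : List Int) : Option String :=
  match PySem.List.pyGet? big_range 0, PySem.List.pyGet? big_range 1, PySem.List.pyGet? big_range 2 with
  | some bottom, some top, some step =>
      whereInLoop name value bottom top step 0 bottom ((top - bottom).toNat + 2)
  | _, _, _ => none

-- ===== PORT B =====
def where_in_alt (name : String) (value : Int) (big_range : List Int) : Option String :=
  match PySem.List.pyGet? big_range 0 with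
  | none => none
  | some bottom =>
  match PySem.List.pyGet? big_range 1 with
  | none => none
  | some top =>
  match PySem.List.pyGet? big_range 2 with
  | none => none
  | some step =>
    if value < bottom ∨ value ≥ top then none
    else
      let lo := bottom + PySem.Int.floordiv (value - bottom) step * step
      some (name ++ " " ++ PySem.Int.toStr lo ++ "-" ++ PySem.Int.toStr (lo + step))

-- ===== PRECONDITION & SPEC =====
-- Pre_ excludes lists with fewer than 3 elements (A raises IndexError) and inputs with
-- bottom < top and step ≤ 0 (A's while loop never terminates there).
def Pre_where_in (name : String) (value : Int) (big_range : List Int) : Prop :=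
  3 ≤ big_range.length ∧ (big_range.getD 0 0 < big_range.getD 1 0 → 1 ≤ big_range.getD 2 0)
instance (name : String) (value : Int) (big_range : List Int) : Decidable (Pre_where_in name value big_range) := by unfold Pre_where_in; infer_instance
def pvWitness_where_in : String × Int × List Int := ("methane", 5, [0, 10, 3])

-- On inputs with bottom < top where value ≥ top yet lands in the one extra bucket A's stale
-- loop condition still scans (bucket start < top + step), A returns a tag for a bucket lying
-- at or beyond top, while B returns none; none is the intended value since value lies
-- outside [bottom, top).
def D_where_in (name : String) (value : Int) (big_range : List Int) : Prop :=
  3 ≤ big_range.length ∧ big_range.getD 0 0 < big_range.getD 1 0 ∧ big_range.getD 1 0 ≤ value ∧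
  big_range.getD 0 0 + (PySem.Int.floordiv (value - big_range.getD 0 0) (big_range.getD 2 0) - 1) * big_range.getD 2 0 < big_range.getD 1 0
instance (name : String) (value : Int) (big_range : List Int) : Decidable (D_where_in name value big_range) := by unfold D_where_in; infer_instance

def Spec_where_in (name : String) (value : Int) (big_range : List Int) (out : Option String) : Prop := ¬ D_where_in name value big_range → out = where_in_alt name value big_range
instance (name : String) (value : Int) (big_range : List Int) (out : Option String) : Decidable (Spec_where_in name value big_range out) := by unfold Spec_where_in; infer_instance

def pvDiffWitness_where_in : String × Int × List Int := ("x", 10, [0, 10, 3])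
def pvDiffWitnessOut_where_in : (Option String) × (Option String) := (some "x 9-12", none)

-- ===== CLAIM (what is proved, stated in full; the proofs are below) =====
def Claim_unchanged_where_in : Prop := ∀ (name : String) (value : Int) (big_range : List Int), Dom_where_in name value big_range → Pre_where_in name value big_range → Spec_where_in name value big_range (where_in name value big_range)
def Claim_changed_where_in : Prop := Dom_where_in (pvDiffWitness_where_in.1) (pvDiffWitness_where_in.2.1) (pvDiffWitness_where_in.2.2) ∧ Pre_where_in (pvDiffWitness_where_in.1) (pvDiffWitness_where_in.2.1) (pvDiffWitness_where_in.2.2) ∧ D_where_in (pvDiffWitness_where_in.1) (pvDiffWitness_where_in.2.1) (pvDiffWitness_where_in.2.2) ∧ where_in (pvDiffWitness_where_in.1) (pvDiffWitness_where_in.2.1) (pvDiffWitness_where_in.2.2) = pvDiffWitnessOut_where_in.1 ∧ where_in_alt (pvDiffWitness_where_in.1) (pvDiffWitness_where_in.2.1) (pvDiffWitness_where_in.2.2) = pvDiffWitnessOut_where_in.2 ∧ pvDiffWitnessOut_where_in.1 ≠ pvDiffWitnessOut_where_in.2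
def Claim_exact_where_in : Prop := ∀ (name : String) (value : Int) (big_range : List Int), Dom_where_in name value big_range → Pre_where_in name value big_range → D_where_in name value big_range → where_in name value big_range ≠ where_in_alt name value big_range

-- ===== LEMMAS AND PROOFS =====

theorem whereInLoop_eq (name : String) (value bottom top step : Int) (hstep : 1 ≤ step) :
    ∀ (fuel : Nat) (i : Int), (top - (bottom + (i - 1) * step)).toNat < fuel →
      whereInLoop name value bottom top step i (bottom + (i - 1) * step) fuel =
        (if bottom + i * step ≤ value ∧
            bottom + (PySem.Int.floordiv (value - bottom) step - 1) * step < top then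
          some (name ++ " " ++ PySem.Int.toStr (bottom + PySem.Int.floordiv (value - bottom) step * step)
            ++ "-" ++ PySem.Int.toStr (bottom + (PySem.Int.floordiv (value - bottom) step + 1) * step))
        else none) := by
  intro fuel
  induction fuel with
  | zero => intro i h; omega
  | succ f ih =>
    intro i h
    have hbr : PySem.Int.floordiv (value - bottom) step * step ≤ value - bottom ∧
        value - bottom < (PySem.Int.floordiv (value - bottom) step + 1) * step :=
      (PySem.Int.floordiv_eq_iff_of_pos (by omega)).mp rfl
    rw [whereInLoop]
    by_cases c1 : bottom + (i - 1) * step < top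
    · rw [if_pos c1]
      simp only []
      by_cases hit : value ≥ bottom + i * step ∧ value < bottom + (i + 1) * step
      · rw [if_pos hit]
        have hieq : PySem.Int.floordiv (value - bottom) step = i := by
          rw [PySem.Int.floordiv_eq_iff_of_pos (by omega)]
          constructor <;> linarith [hit.1, hit.2]
        rw [hieq, if_pos ⟨hit.1, c1⟩]
      · rw [if_neg hit]
        have e1 : bottom + i * step = bottom + (((i + 1) : Int) - 1) * step := by ring
        have hf : (top - (bottom + (((i + 1) : Int) - 1) * step)).toNat < f := by
          have h1 : bottom + (((i + 1) : Int) - 1) * step = (bottom + (i - 1) * step) + step := by ring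
          rw [h1]
          generalize bottom + (i - 1) * step = A at h c1 ⊢
          omega
        rw [e1, ih (i + 1) hf]
        push Not at hit
        split_ifs with h1 h2 h2
        · rfl
        · exact absurd ⟨by linarith [h1.1], h1.2⟩ h2
        · exfalso
          have hv : value ≥ bottom + i * step := by linarith [h2.1]
          exact h1 ⟨by linarith [hit hv], h2.2⟩
        · rfl
    · rw [if_neg c1]
      rw [if_neg]
      rintro ⟨hv, htop⟩
      apply c1
      have hii0 : i ≤ PySem.Int.floordiv (value - bottom) step := by
        have h4 : i * step < (PySem.Int.floordiv (value - bottom) step + 1) * step := by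
          linarith [hbr.2, hv]
        have := lt_of_mul_lt_mul_right h4 (by omega : (0:ℤ) ≤ step)
        omega
      nlinarith [mul_le_mul_of_nonneg_right
        (show i - 1 ≤ PySem.Int.floordiv (value - bottom) step - 1 by omega)
        (show (0:ℤ) ≤ step by omega)]

-- Characterisation of A on well-formed ranges: some tag at the floor-division bucket iff
-- bottom ≤ value and the loop's (stale) condition reaches that bucket.
theorem where_in_char (name : String) (value bottom top step : Int) (rest : List Int)
    (hbt : bottom < top) (hstep : 1 ≤ step) :
    where_in name value (bottom :: top :: step :: rest) =
      (if bottom ≤ value ∧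
          bottom + (PySem.Int.floordiv (value - bottom) step - 1) * step < top then
        some (name ++ " " ++ PySem.Int.toStr (bottom + PySem.Int.floordiv (value - bottom) step * step)
          ++ "-" ++ PySem.Int.toStr (bottom + (PySem.Int.floordiv (value - bottom) step + 1) * step))
      else none) := by
  have h0 : PySem.List.pyGet? (bottom :: top :: step :: rest) 0 = some bottom := by
    simp only [PySem.List.pyGet?, PySem.List.pyIdx?, List.length_cons]
    rw [if_pos (by norm_num), if_pos (by push_cast; omega)]
    simp
  have h1 : PySem.List.pyGet? (bottom :: top :: step :: rest) 1 = some top := by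
    simp only [PySem.List.pyGet?, PySem.List.pyIdx?, List.length_cons]
    rw [if_pos (by norm_num), if_pos (by push_cast; omega)]
    simp
  have h2 : PySem.List.pyGet? (bottom :: top :: step :: rest) 2 = some step := by
    simp only [PySem.List.pyGet?, PySem.List.pyIdx?, List.length_cons]
    rw [if_pos (by norm_num), if_pos (by push_cast; omega)]
    simp
  have hbr : PySem.Int.floordiv (value - bottom) step * step ≤ value - bottom ∧
      value - bottom < (PySem.Int.floordiv (value - bottom) step + 1) * step :=
    (PySem.Int.floordiv_eq_iff_of_pos (by omega)).mp rfl
  simp only [where_in, h0, h1, h2]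
  rw [whereInLoop, if_pos hbt]
  simp only []
  by_cases hit : value ≥ bottom + 0 * step ∧ value < bottom + (0 + 1) * step
  · rw [if_pos hit]
    have hi00 : PySem.Int.floordiv (value - bottom) step = 0 := by
      rw [PySem.Int.floordiv_eq_iff_of_pos (by omega)]
      constructor <;> [linarith [hit.1]; linarith [hit.2]]
    rw [if_pos (show bottom ≤ value ∧ _ by
      refine ⟨by linarith [hit.1], ?_⟩
      rw [hi00]; nlinarith)]
    rw [hi00]
  · rw [if_neg hit]
    have e1 : bottom + 0 * step = bottom + (((0:ℤ) + 1) - 1) * step := by ring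
    have hf : (top - (bottom + (((0:ℤ) + 1) - 1) * step)).toNat < (top - bottom).toNat + 1 := by
      have h3 : bottom + (((0:ℤ) + 1) - 1) * step = bottom := by ring
      rw [h3]; omega
    rw [e1, whereInLoop_eq name value bottom top step hstep ((top - bottom).toNat + 1) (0 + 1) hf]
    push Not at hit
    split_ifs with ha hb hb
    · rfl
    · exact absurd ⟨by linarith [ha.1], ha.2⟩ hb
    · exfalso
      have hv : bottom ≤ value := hb.1
      exact ha ⟨by linarith [hit (by linarith : value ≥ bottom + 0 * step)], hb.2⟩
    · rfl

theorem pyGet?_three (bottom top step : Int) (rest : List Int) :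
    PySem.List.pyGet? (bottom :: top :: step :: rest) 0 = some bottom ∧
    PySem.List.pyGet? (bottom :: top :: step :: rest) 1 = some top ∧
    PySem.List.pyGet? (bottom :: top :: step :: rest) 2 = some step := by
  refine ⟨?_, ?_, ?_⟩ <;>
  · simp only [PySem.List.pyGet?, PySem.List.pyIdx?, List.length_cons]
    rw [if_pos (by norm_num), if_pos (by push_cast; omega)]
    simp

-- ===== VERDICT (by name: the statements are the Claim_ definitions above) =====
theorem where_in_spec : Claim_unchanged_where_in := by
  unfold Claim_unchanged_where_in
  intro name value big_range _ hpre
  unfold Spec_where_in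
  intro hnd
  obtain ⟨hlen, hstep'⟩ := hpre
  match big_range with
  | bottom :: top :: step :: rest =>
    simp only [List.getD_cons_zero, List.getD_cons_succ] at hstep'
    obtain ⟨h0, h1, h2⟩ := pyGet?_three bottom top step rest
    unfold D_where_in at hnd
    simp only [List.getD_cons_zero, List.getD_cons_succ, List.length_cons] at hnd
    push Not at hnd
    by_cases hbt : bottom < top
    · have hstep : 1 ≤ step := hstep' hbt
      have hbr : PySem.Int.floordiv (value - bottom) step * step ≤ value - bottom ∧
          value - bottom < (PySem.Int.floordiv (value - bottom) step + 1) * step :=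
        (PySem.Int.floordiv_eq_iff_of_pos (by omega)).mp rfl
      rw [where_in_char name value bottom top step rest hbt hstep]
      simp only [where_in_alt, h0, h1, h2]
      by_cases hv : value < bottom
      · rw [if_neg (by rintro ⟨hc, -⟩; nlinarith), if_pos (Or.inl hv)]
      · push Not at hv
        by_cases hvt : value < top
        · have hcond : bottom + (PySem.Int.floordiv (value - bottom) step - 1) * step < top := by
            nlinarith
          rw [if_pos ⟨hv, hcond⟩,
            if_neg (show ¬(value < bottom ∨ value ≥ top) by push Not; exact ⟨hv, hvt⟩)]
          have e : bottom + PySem.Int.floordiv (value - bottom) step * step + step =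
              bottom + (PySem.Int.floordiv (value - bottom) step + 1) * step := by ring
          simp only [e]
        · push Not at hvt
          have hnc : ¬ (bottom + (PySem.Int.floordiv (value - bottom) step - 1) * step < top) := by
            have := hnd (by omega) hbt hvt; omega
          rw [if_neg (by rintro ⟨-, hc⟩; exact hnc hc), if_pos (Or.inr hvt)]
    · simp only [where_in, where_in_alt, h0, h1, h2]
      rw [whereInLoop, if_neg hbt]
      rw [if_pos (show value < bottom ∨ value ≥ top by omega)]

theorem where_in_changed : Claim_changed_where_in := by
  unfold Claim_changed_where_in; decide

theorem where_in_tight : Claim_exact_where_in := by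
  unfold Claim_exact_where_in
  intro name value big_range _ hpre hd
  obtain ⟨hlen, hstep'⟩ := hpre
  match big_range with
  | bottom :: top :: step :: rest =>
    unfold D_where_in at hd
    simp only [List.getD_cons_zero, List.getD_cons_succ] at hd hstep'
    obtain ⟨-, hbt, hvt, hcond⟩ := hd
    have hstep : 1 ≤ step := hstep' hbt
    obtain ⟨h0, h1, h2⟩ := pyGet?_three bottom top step rest
    rw [where_in_char name value bottom top step rest hbt hstep]
    simp only [where_in_alt, h0, h1, h2]
    rw [if_pos ⟨by omega, hcond⟩, if_pos (Or.inr (by omega))]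
    simp
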